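-- pv_equiv track=rewrite | github.com/rakeshgg/AdvanceDSA | 4. Stack/3. Next_Greater_PREV_Greater.py | find_next_and_previous_greater_indexes
-- ===== SOURCE A (Python) =====
-- def find_next_and_previous_greater_indexes(arr):
--     # Initialize an empty stack
--     stack = []
--     # Initialize previousGreater and nextGreater arrays
--     previousGreater = [-1] * len(arr)
--     nextGreater = [-1] * len(arr)
--     # Iterate through all the elements of the array
--     for i in range(len(arr)):
--         # While loop runs until the stack is not empty AND
--         # the element represented by stack top is SMALLER OR EQUAL to the current element
--         # This means, the stack will always be strictly decreasing (type 3) -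
--         # because elements are popped when they are equal
--         # So equal elements will never stay in the stack (definition of a strictly decreasing stack)
--         while stack and arr[stack[-1]] <= arr[i]:
--             # Pop out the top of the stack; it represents the index of the item
--             stack_top = stack.pop()
--             # Decide the next greater element for the index popped out from stack
--             nextGreater[stack_top] = i
--         # After the while loop, only the elements which are greater than the current element are left in the stack
--         # This means we can confidently decide the previous greater element of
--         # the current element i, which is the stack top
--         if stack:
--             previousGreater[i] = stack[-1]
--         # Push the current element
--         stack.append(i)
--     return [previousGreater, nextGreater]
-- ===== SOURCE B (Python) =====
-- def find_next_and_previous_greater_indexes(arr):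
--     # Two independent direct scans per index instead of A's single monotonic-stack sweep.
--     n = len(arr)
--     previousGreater = []
--     for i in range(n):
--         p = -1
--         for j in range(i - 1, -1, -1):
--             if arr[j] > arr[i]:
--                 p = j
--                 break
--         previousGreater.append(p)
--     nextGreater = []
--     for i in range(n):
--         m = -1
--         for j in range(i + 1, n):
--             if arr[j] >= arr[i]:
--                 m = j
--                 break
--         nextGreater.append(m)
--     return [previousGreater, nextGreater]
-- ===== Notes on version B (the rewrite author's own statement) =====
-- stated objective: alternative
-- what changed: Replaces the single combined monotonic-stack sweep with two independent per-index direct scans: for each index scan left for the nearest strictly greater element and right for the nearest greater-or-equal element.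
import Mathlib
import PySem

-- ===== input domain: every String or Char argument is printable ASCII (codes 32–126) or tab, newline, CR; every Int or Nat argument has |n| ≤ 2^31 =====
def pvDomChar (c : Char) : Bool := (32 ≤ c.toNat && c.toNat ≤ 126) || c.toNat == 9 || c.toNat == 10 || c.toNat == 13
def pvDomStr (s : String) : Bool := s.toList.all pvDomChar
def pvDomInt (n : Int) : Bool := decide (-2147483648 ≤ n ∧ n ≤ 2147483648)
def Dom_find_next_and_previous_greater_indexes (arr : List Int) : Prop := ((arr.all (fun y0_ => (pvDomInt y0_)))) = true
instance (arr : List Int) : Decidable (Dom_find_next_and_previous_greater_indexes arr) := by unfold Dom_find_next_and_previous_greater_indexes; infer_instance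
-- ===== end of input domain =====

-- B replaces A's single monotonic-stack sweep by two independent per-index direct
-- scans (nearest strictly greater on the left, nearest greater-or-equal on the right);
-- objective: alternative (genuinely different algorithm, not claimed faster).

-- ===== PORT A =====
-- the inner while loop: pop while stack nonempty and arr[top] <= arr[i],
-- recording nextGreater[top] = i for every popped index.
-- All indices handled are in [0, arr.length), so List.getD is exact for Python's arr[k].
def popLoopA (arr : List Int) (i : Nat) : List Nat → List Int → List Nat × List Int
  | [], ng => ([], ng)
  | t :: rest, ng =>
    if arr.getD t 0 ≤ arr.getD i 0 then popLoopA arr i rest (ng.set t (i : Int))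
    else (t :: rest, ng)

-- one iteration of the for loop over i (stack modelled head = top)
def stepA (arr : List Int) (s : List Nat × List Int × List Int) (i : Nat) :
    List Nat × List Int × List Int :=
  let (st', ng') := popLoopA arr i s.1 s.2.2
  let pg' := match st' with
    | [] => s.2.1
    | t :: _ => s.2.1.set i (t : Int)
  (i :: st', pg', ng')

def find_next_and_previous_greater_indexes (arr : List Int) : List (List Int) :=
  let n := arr.length
  let s := (List.range n).foldl (stepA arr) ([], List.replicate n (-1), List.replicate n (-1))
  [s.2.1, s.2.2]

-- ===== PORT B =====
-- scan j = i-1, i-2, …, 0 for the first j with arr[j] > ai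
def findPrevB (arr : List Int) (ai : Int) : Nat → Int
  | 0 => -1
  | j + 1 => if ai < arr.getD j 0 then (j : Int) else findPrevB arr ai j

-- scan j = j0, j0+1, …, n-1 for the first j with arr[j] ≥ ai
def findNextB (arr : List Int) (ai : Int) (n : Nat) (j : Nat) : Int :=
  if h : j < n then
    (if arr.getD j 0 ≥ ai then (j : Int) else findNextB arr ai n (j + 1))
  else -1
termination_by n - j

def find_next_and_previous_greater_indexes_alt (arr : List Int) : List (List Int) :=
  let n := arr.length
  [(List.range n).map (fun i => findPrevB arr (arr.getD i 0) i),
   (List.range n).map (fun i => findNextB arr (arr.getD i 0) n (i + 1))]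

-- ===== PRECONDITION & SPEC =====
def Spec_find_next_and_previous_greater_indexes (arr : List Int) (out : List (List Int)) : Prop := out = find_next_and_previous_greater_indexes_alt arr
instance (arr : List Int) (out : List (List Int)) : Decidable (Spec_find_next_and_previous_greater_indexes arr out) := by unfold Spec_find_next_and_previous_greater_indexes; infer_instance

-- ===== CLAIM (what is proved, stated in full; the proofs are below) =====
def Claim_equal_find_next_and_previous_greater_indexes : Prop := ∀ (arr : List Int), Dom_find_next_and_previous_greater_indexes arr → Spec_find_next_and_previous_greater_indexes arr (find_next_and_previous_greater_indexes arr)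

-- ===== LEMMAS AND PROOFS =====

-- abbreviation for arr[k] (indices always in range where used)
def aV (arr : List Int) (k : Nat) : Int := arr.getD k 0

-- the stack after the first i iterations of A's loop: indices j < i with no
-- greater-or-equal element after them (before i), top (= head) is the largest index
abbrev stkP (arr : List Int) (i j : Nat) : Prop := ∀ k < i, j < k → aV arr k < aV arr j

def stk (arr : List Int) (i : Nat) : List Nat :=
  ((List.range i).filter (fun j => decide (stkP arr i j))).reverse

def pgVal (arr : List Int) (i t : Nat) : Int :=
  if t < i then findPrevB arr (aV arr t) t else -1

def ngVal (arr : List Int) (n i t : Nat) : Int :=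
  let f := findNextB arr (aV arr t) n (t + 1)
  if t < i ∧ 0 ≤ f ∧ f < (i : Int) then f else -1

-- ---- basic stack facts ----
lemma mem_stk (arr : List Int) (i t : Nat) :
    t ∈ stk arr i ↔ t < i ∧ stkP arr i t := by
  simp [stk, List.mem_filter, List.mem_range, and_comm]

lemma stk_pairwise_gt (arr : List Int) (i : Nat) :
    (stk arr i).Pairwise (· > ·) := by
  have h := (List.pairwise_lt_range (n := i)).filter (fun j => decide (stkP arr i j))
  simpa [stk, List.pairwise_reverse] using h

lemma stk_pairwise_val (arr : List Int) (i : Nat) :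
    (stk arr i).Pairwise (fun x y => aV arr x < aV arr y) := by
  refine List.Pairwise.imp_of_mem ?_ (stk_pairwise_gt arr i)
  intro a b ha hb hab
  rcases (mem_stk arr i a).1 ha with ⟨hai, _⟩
  rcases (mem_stk arr i b).1 hb with ⟨hbi, hbP⟩
  exact hbP a hai hab

-- ---- popLoopA on a value-increasing stack ----
lemma popLoopA_spec (arr : List Int) (i : Nat) :
    ∀ (st : List Nat) (ng : List Int),
      st.Pairwise (fun x y => aV arr x < aV arr y) →
      popLoopA arr i st ng =
        (st.filter (fun t => decide (aV arr i < aV arr t)),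
         (st.filter (fun t => decide (aV arr t ≤ aV arr i))).foldl
           (fun g t => g.set t (i : Int)) ng) := by
  intro st
  induction st with
  | nil => intro ng _; simp [popLoopA]
  | cons t rest ih =>
    intro ng hp
    have hp' := List.Pairwise.of_cons hp
    have hrest : ∀ x ∈ rest, aV arr t < aV arr x := (List.pairwise_cons.1 hp).1
    by_cases h : aV arr t ≤ aV arr i
    · have hlt : ¬ aV arr i < aV arr t := not_lt.2 h
      rw [show popLoopA arr i (t :: rest) ng = popLoopA arr i rest (ng.set t (i : Int)) from by
        simp only [popLoopA, aV] at h ⊢; rw [if_pos h]]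
      rw [ih _ hp']
      rw [List.filter_cons_of_neg (by simpa using hlt),
        List.filter_cons_of_pos (by simpa using h), List.foldl_cons]
    · have hlt : aV arr i < aV arr t := lt_of_not_ge h
      have hnone : ∀ x ∈ rest, ¬ aV arr x ≤ aV arr i := by
        intro x hx
        exact not_le.2 (lt_trans hlt (hrest x hx))
      have hall : ∀ x ∈ rest, aV arr i < aV arr x := fun x hx => lt_trans hlt (hrest x hx)
      have h1 : List.filter (fun u => decide (aV arr i < aV arr u)) (t :: rest)
          = t :: rest := by
        rw [List.filter_cons_of_pos (by simpa using hlt)]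
        congr 1
        exact List.filter_eq_self.2 (fun x hx => by simpa using hall x hx)
      have h2 : List.filter (fun u => decide (aV arr u ≤ aV arr i)) (t :: rest)
          = [] := by
        rw [List.filter_cons_of_neg (by simpa using h)]
        exact List.filter_eq_nil_iff.2 (fun x hx => by simpa using hnone x hx)
      rw [show popLoopA arr i (t :: rest) ng = (t :: rest, ng) from by
        simp only [popLoopA, aV] at h ⊢; rw [if_neg h]]
      rw [h1, h2, List.foldl_nil]

-- ---- stack recurrence ----
lemma stkP_succ (arr : List Int) (i j : Nat) (hj : j < i) :
    stkP arr (i + 1) j ↔ stkP arr i j ∧ aV arr i < aV arr j := by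
  constructor
  · intro h
    exact ⟨fun k hk hjk => h k (Nat.lt_succ_of_lt hk) hjk, h i (Nat.lt_succ_self i) hj⟩
  · rintro ⟨h1, h2⟩ k hk hjk
    rcases Nat.lt_succ_iff_lt_or_eq.1 hk with hk' | rfl
    · exact h1 k hk' hjk
    · exact h2

lemma stk_succ (arr : List Int) (i : Nat) :
    stk arr (i + 1) = i :: (stk arr i).filter (fun t => decide (aV arr i < aV arr t)) := by
  unfold stk
  rw [List.range_succ, List.filter_append, List.reverse_append]
  have hi : stkP arr (i + 1) i := by intro k hk hik; omega
  have h1 : List.filter (fun j => decide (stkP arr (i+1) j)) [i] = [i] := by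
    simp only [List.filter_cons, List.filter_nil, decide_eq_true_eq, if_pos hi]
  rw [h1]
  have h2 : List.filter (fun j => decide (stkP arr (i+1) j)) (List.range i)
      = List.filter (fun t => decide (aV arr i < aV arr t))
          (List.filter (fun j => decide (stkP arr i j)) (List.range i)) := by
    rw [List.filter_filter]
    apply List.filter_congr
    intro x hx
    have hxi : x < i := List.mem_range.1 hx
    simp [stkP_succ arr i x hxi, Bool.and_comm]
  rw [h2, ← List.filter_reverse]
  simp

-- ---- findPrevB characterisation ----
lemma findPrevB_spec (arr : List Int) (ai : Int) (i : Nat) :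
    (findPrevB arr ai i = -1 ∧ ∀ j < i, aV arr j ≤ ai) ∨
    (∃ j < i, findPrevB arr ai i = (j : Int) ∧ ai < aV arr j ∧
      ∀ k < i, j < k → aV arr k ≤ ai) := by
  induction i with
  | zero => left; exact ⟨rfl, fun j hj => absurd hj (Nat.not_lt_zero j)⟩
  | succ m ih =>
    by_cases h : ai < arr.getD m 0
    · right
      exact ⟨m, Nat.lt_succ_self m, by
        rw [show findPrevB arr ai (m + 1)
            = if ai < arr.getD m 0 then (m : Int) else findPrevB arr ai m from rfl, if_pos h], h,
        fun k hk hmk => absurd hk (by omega)⟩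
    · have heq : findPrevB arr ai (m + 1) = findPrevB arr ai m := by
        rw [show findPrevB arr ai (m + 1)
            = if ai < arr.getD m 0 then (m : Int) else findPrevB arr ai m from rfl, if_neg h]
      rcases ih with ⟨h1, h2⟩ | ⟨j, hj, h1, h2, h3⟩
      · left
        refine ⟨heq.trans h1, fun j hj => ?_⟩
        rcases Nat.lt_succ_iff_lt_or_eq.1 hj with hj' | rfl
        · exact h2 j hj'
        · exact not_lt.1 h
      · right
        refine ⟨j, Nat.lt_succ_of_lt hj, heq.trans h1, h2, fun k hk hjk => ?_⟩
        rcases Nat.lt_succ_iff_lt_or_eq.1 hk with hk' | rfl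
        · exact h3 k hk' hjk
        · exact not_lt.1 h

-- ---- findNextB characterisation ----
lemma findNextB_spec (arr : List Int) (ai : Int) (n : Nat) :
    ∀ j, (findNextB arr ai n j = -1 ∧ ∀ k, j ≤ k → k < n → aV arr k < ai) ∨
    (∃ m : Nat, findNextB arr ai n j = (m : Int) ∧ j ≤ m ∧ m < n ∧ ai ≤ aV arr m ∧
      ∀ k, j ≤ k → k < m → aV arr k < ai) := by
  intro j
  induction hn : n - j using Nat.strong_induction_on generalizing j with
  | _ d ih =>
    by_cases hjn : j < n
    · by_cases hv : arr.getD j 0 ≥ ai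
      · right
        refine ⟨j, ?_, le_refl j, hjn, hv, fun k hk1 hk2 => absurd hk1 (by omega)⟩
        rw [findNextB, dif_pos hjn, if_pos hv]
      · have heq : findNextB arr ai n j = findNextB arr ai n (j + 1) := by
          rw [findNextB, dif_pos hjn, if_neg hv]
        have hd : n - (j + 1) < d := by omega
        rcases ih _ hd (j + 1) rfl with ⟨h1, h2⟩ | ⟨m, h1, h2, h3, h4, h5⟩
        · left
          refine ⟨heq.trans h1, fun k hk1 hk2 => ?_⟩
          rcases Nat.eq_or_lt_of_le hk1 with rfl | hk'
          · exact lt_of_not_ge hv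
          · exact h2 k hk' hk2
        · right
          refine ⟨m, heq.trans h1, by omega, h3, h4, fun k hk1 hk2 => ?_⟩
          rcases Nat.eq_or_lt_of_le hk1 with rfl | hk'
          · exact lt_of_not_ge hv
          · exact h5 k hk' hk2
    · left
      refine ⟨?_, fun k hk1 hk2 => absurd hk2 (by omega)⟩
      rw [findNextB, dif_neg hjn]

lemma findNextB_eq (arr : List Int) (ai : Int) (n i t : Nat)
    (hin : i < n) (hti : t < i) (hv : ai ≤ aV arr i)
    (hmid : ∀ k, t < k → k < i → aV arr k < ai) :
    findNextB arr ai n (t + 1) = (i : Int) := by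
  rcases findNextB_spec arr ai n (t + 1) with ⟨h1, h2⟩ | ⟨m, h1, h2, h3, h4, h5⟩
  · exact absurd (h2 i (by omega) hin) (not_lt.2 hv)
  · rw [h1]
    have hmi : m = i := by
      by_cases hlt : m < i
      · exact absurd h4 (not_le.2 (hmid m (by omega) hlt))
      · by_cases hgt : i < m
        · exact absurd hv (not_le.2 (h5 i (by omega) hgt))
        · omega
    rw [hmi]

-- ---- pointwise view of the ng updates ----
lemma foldl_set_getElem? (v : Int) :
    ∀ (l : List Nat) (g : List Int) (t : Nat),
      (l.foldl (fun g u => g.set u v) g)[t]? =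
        if t ∈ l ∧ t < g.length then some v else g[t]? := by
  intro l
  induction l with
  | nil => intro g t; simp
  | cons u rest ih =>
    intro g t
    rw [List.foldl_cons, ih, List.length_set, List.getElem?_set]
    by_cases htu : u = t
    · subst htu
      by_cases hlen : u < g.length
      · simp [hlen]
      · simp [hlen, List.getElem?_eq_none (Nat.le_of_not_lt hlen), List.mem_cons]
    · have htu' : t ≠ u := fun h => htu h.symm
      simp [List.mem_cons, htu, htu']

-- ---- the main loop invariant ----
lemma loop_inv (arr : List Int) (i : Nat) (hi : i ≤ arr.length) :
    (List.range i).foldl (stepA arr)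
        ([], List.replicate arr.length (-1), List.replicate arr.length (-1)) =
      (stk arr i,
       (List.range arr.length).map (fun t => pgVal arr i t),
       (List.range arr.length).map (fun t => ngVal arr arr.length i t)) := by
  induction i with
  | zero =>
    simp only [List.range_zero, List.foldl_nil]
    refine congrArg₂ _ ?_ (congrArg₂ _ ?_ ?_)
    · simp [stk]
    · rw [show (fun t => pgVal arr 0 t) = (fun _ => (-1 : Int)) from
        funext (fun t => by simp [pgVal])]
      simp [List.map_const']
    · rw [show (fun t => ngVal arr arr.length 0 t) = (fun _ => (-1 : Int)) from
        funext (fun t => by simp [ngVal])]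
      simp [List.map_const']
  | succ m ih =>
    have hm : m ≤ arr.length := by omega
    have hmn : m < arr.length := by omega
    rw [List.range_succ, List.foldl_append, ih hm, List.foldl_cons, List.foldl_nil]
    unfold stepA
    rw [popLoopA_spec arr m _ _ (stk_pairwise_val arr m)]
    simp only
    -- the new stack
    have hstack : m :: (stk arr m).filter (fun t => decide (aV arr m < aV arr t))
        = stk arr (m + 1) := (stk_succ arr m).symm
    -- the new nextGreater array
    have hng : ((stk arr m).filter (fun t => decide (aV arr t ≤ aV arr m))).foldl
          (fun g t => g.set t (m : Int))
          ((List.range arr.length).map (fun t => ngVal arr arr.length m t))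
        = (List.range arr.length).map (fun t => ngVal arr arr.length (m + 1) t) := by
      set popped := (stk arr m).filter (fun t => decide (aV arr t ≤ aV arr m)) with hpop
      apply List.ext_getElem?
      intro t
      rw [foldl_set_getElem? (m : Int) popped _ t]
      by_cases htn : t < arr.length
      · have hglen : t < ((List.range arr.length).map
            (fun t => ngVal arr arr.length m t)).length := by simpa using htn
        by_cases hmem : t ∈ popped
        · have htm : t ∈ stk arr m ∧ aV arr t ≤ aV arr m := by
            have := List.mem_filter.1 (hpop ▸ hmem)
            exact ⟨this.1, by simpa using this.2⟩
          rcases (mem_stk arr m t).1 htm.1 with ⟨hti, hP⟩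
          have hf : findNextB arr (aV arr t) arr.length (t + 1) = (m : Int) :=
            findNextB_eq arr (aV arr t) arr.length m t hmn hti htm.2
              (fun k hk1 hk2 => hP k hk2 hk1)
          have hval : ngVal arr arr.length (m + 1) t = (m : Int) := by
            unfold ngVal
            rw [hf]
            have : t < m + 1 ∧ (0:Int) ≤ (m:Int) ∧ (m:Int) < ((m:Nat) + 1 : Nat) := by
              constructor
              · omega
              · constructor
                · exact Int.natCast_nonneg m
                · push_cast; omega
            rw [if_pos (by push_cast at this ⊢; exact this)]
          rw [if_pos ⟨hmem, hglen⟩, List.getElem?_map, List.getElem?_range htn,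
            Option.map_some, hval]
        · rw [if_neg (by simp [hmem]), List.getElem?_map, List.getElem?_map,
            List.getElem?_range htn, Option.map_some, Option.map_some]
          congr 1
          -- ngVal unchanged at t
          unfold ngVal
          by_cases ht1 : t < m
          · by_cases hst : t ∈ stk arr m
            · -- in stack, not popped: arr[m] < arr[t]; no hit < m+1
              have hnp : ¬ aV arr t ≤ aV arr m := by
                intro hle
                exact hmem (hpop ▸ List.mem_filter.2 ⟨hst, by simpa using hle⟩)
              rcases (mem_stk arr m t).1 hst with ⟨_, hP⟩
              rcases findNextB_spec arr (aV arr t) arr.length (t + 1)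
                with ⟨h1, _⟩ | ⟨w, h1, h2, h3, h4, _⟩
              · rw [h1]; simp
              · rw [h1]
                have hwge : ¬ w < m + 1 := by
                  intro hw
                  by_cases hwm : w < m
                  · exact absurd h4 (not_le.2 (hP w hwm (by omega)))
                  · have : w = m := by omega
                    subst this
                    exact hnp h4
                have hc1 : ¬ ((w:Int) < (m:Int)) := by
                  intro h; exact hwge (by exact_mod_cast Nat.lt_succ_of_lt (by exact_mod_cast h))
                have hc2 : ¬ ((w:Int) < ((m:Nat) + 1 :Int)) := by
                  intro h; exact hwge (by exact_mod_cast h)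
                simp only [hc1, hc2, and_false, if_neg, not_false_iff]
                simp [hc1, hc2]
            · -- not in stack: the next hit is already < m
              have hnP : ¬ stkP arr m t := fun h => hst ((mem_stk arr m t).2 ⟨ht1, h⟩)
              have hex : ∃ k, k < m ∧ t < k ∧ aV arr t ≤ aV arr k := by
                by_contra hne
                push_neg at hne
                exact hnP (fun k hk htk => lt_of_not_ge (fun hge => absurd hge
                  (not_le.2 (lt_of_not_ge (fun hge2 => by
                    exact absurd hge2 (not_le.2 (by
                      have := hne k hk htk
                      exact this)))))))
              rcases hex with ⟨k, hk1, hk2, hk3⟩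
              rcases findNextB_spec arr (aV arr t) arr.length (t + 1)
                with ⟨_, h2⟩ | ⟨w, h1, h2, h3, h4, h5⟩
              · exact absurd (h2 k (by omega) (by omega)) (not_lt.2 hk3)
              · rw [h1]
                have hwk : w ≤ k := by
                  by_contra hgt
                  exact absurd (h5 k (by omega) (by omega)) (not_lt.2 hk3)
                have hwm : w < m := by omega
                have hc1 : (w:Int) < (m:Int) := by exact_mod_cast hwm
                have hc2 : (w:Int) < ((m:Nat) + 1 : Int) := by push_cast; omega
                rw [if_pos ⟨ht1, Int.natCast_nonneg w, hc1⟩,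
                  if_pos ⟨by omega, Int.natCast_nonneg w, by push_cast; omega⟩]
          · -- t ≥ m : new value also -1 (t = m: hit would be ≥ m+1; t > m: t < m+1 false)
            by_cases htm : t = m
            · subst htm
              rw [if_neg (by omega)]
              rcases findNextB_spec arr (aV arr t) arr.length (t + 1)
                with ⟨h1, _⟩ | ⟨w, h1, h2, _, _, _⟩
              · rw [h1]; simp
              · rw [h1]
                have : ¬ ((w:Int) < ((t:Nat) + 1 : Int)) := by push_cast; omega
                simp [this]
            · rw [if_neg (by omega), if_neg (by omega)]
      · have h1 : ¬ t < ((List.range arr.length).map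
            (fun t => ngVal arr arr.length m t)).length := by simpa using htn
        rw [if_neg (fun hc => h1 hc.2), List.getElem?_eq_none (by simpa using htn),
          List.getElem?_eq_none (by simpa using htn)]
    -- the new previousGreater array
    have hpg : (match (stk arr m).filter (fun t => decide (aV arr m < aV arr t)) with
          | [] => (List.range arr.length).map (fun t => pgVal arr m t)
          | t :: _ => ((List.range arr.length).map (fun t => pgVal arr m t)).set m (t : Int))
        = (List.range arr.length).map (fun t => pgVal arr (m + 1) t) := by
      have hsame : ∀ t, t ≠ m → pgVal arr (m + 1) t = pgVal arr m t := by
        intro t ht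
        unfold pgVal
        by_cases h1 : t < m
        · rw [if_pos h1, if_pos (by omega)]
        · rw [if_neg h1, if_neg (by omega)]
      have hmemst : ∀ x, x ∈ (stk arr m).filter (fun t => decide (aV arr m < aV arr t)) ↔
          (x < m ∧ stkP arr m x ∧ aV arr m < aV arr x) := by
        intro x
        rw [List.mem_filter, mem_stk]
        simp [and_assoc]
      cases hcase : (stk arr m).filter (fun t => decide (aV arr m < aV arr t)) with
      | nil =>
        -- no strictly greater element to the left: pgVal (m+1) m = -1 = pgVal m m
        have hnone : ∀ j < m, stkP arr m j → ¬ aV arr m < aV arr j := by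
          intro j hj hP hlt
          have : j ∈ ([] : List Nat) := hcase ▸ (hmemst j).2 ⟨hj, hP, hlt⟩
          simp at this
        have hpm : pgVal arr (m + 1) m = -1 := by
          unfold pgVal
          rw [if_pos (Nat.lt_succ_self m)]
          rcases findPrevB_spec arr (aV arr m) m with ⟨h1, _⟩ | ⟨j, hj, h1, h2, h3⟩
          · exact h1
          · exfalso
            have hP : stkP arr m j := by
              intro k hk hjk
              exact lt_of_le_of_lt (h3 k hk hjk) h2
            exact hnone j hj hP h2
        apply List.ext_getElem?
        intro t
        by_cases htn : t < arr.length
        · rw [List.getElem?_map, List.getElem?_map, List.getElem?_range htn,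
            Option.map_some, Option.map_some]
          by_cases htm : t = m
          · subst htm
            rw [hpm]
            unfold pgVal
            rw [if_neg (by omega)]
          · rw [hsame t htm]
        · rw [List.getElem?_eq_none (by simpa using htn), List.getElem?_eq_none (by simpa using htn)]
      | cons t rest =>
        -- top of the remaining stack = nearest strictly greater on the left
        have htmem : t < m ∧ stkP arr m t ∧ aV arr m < aV arr t :=
          (hmemst t).1 (hcase ▸ List.mem_cons_self)
        have hmax : ∀ x, x < m → stkP arr m x → aV arr m < aV arr x → x ≤ t := by
          intro x hx hP hlt
          have hxmem : x ∈ t :: rest := hcase ▸ (hmemst x).2 ⟨hx, hP, hlt⟩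
          have hpw : (t :: rest).Pairwise (· > ·) := by
            rw [← hcase]
            exact (stk_pairwise_gt arr m).filter _
          rcases List.mem_cons.1 hxmem with rfl | hxr
          · exact le_refl x
          · exact le_of_lt ((List.pairwise_cons.1 hpw).1 x hxr)
        have hpm : pgVal arr (m + 1) m = (t : Int) := by
          unfold pgVal
          rw [if_pos (Nat.lt_succ_self m)]
          rcases findPrevB_spec arr (aV arr m) m with ⟨_, h2⟩ | ⟨j, hj, h1, h2, h3⟩
          · exact absurd (h2 t htmem.1) (not_le.2 htmem.2.2)
          · rw [h1]
            have hjP : stkP arr m j := fun k hk hjk =>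
              lt_of_le_of_lt (h3 k hk hjk) h2
            have hjt : j ≤ t := hmax j hj hjP h2
            have htj : t ≤ j := by
              by_contra hgt
              exact absurd (h3 t htmem.1 (by omega)) (not_le.2 htmem.2.2)
            have : j = t := le_antisymm hjt htj
            rw [this]
        apply List.ext_getElem?
        intro u
        by_cases hun : u < arr.length
        · have hulen : u < ((List.range arr.length).map (fun t => pgVal arr m t)).length := by
            simpa using hun
          by_cases hum : u = m
          · subst hum
            rw [List.getElem?_set, if_pos rfl, if_pos hulen, List.getElem?_map,
              List.getElem?_range hun, Option.map_some, hpm]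
          · rw [List.getElem?_set, if_neg (fun h => hum h.symm), List.getElem?_map,
              List.getElem?_map, List.getElem?_range hun, Option.map_some,
              Option.map_some, hsame u hum]
        · rw [List.getElem?_set]
          rw [List.getElem?_eq_none (by simpa using hun), List.getElem?_eq_none (by simpa using hun)]
          rw [if_neg (by intro h; omega)]
    rw [hstack, hng]
    rw [hpg]

-- at i = n the ngVal window covers everything findNextB can return
lemma ngVal_final (arr : List Int) (t : Nat) (ht : t < arr.length) :
    ngVal arr arr.length arr.length t = findNextB arr (aV arr t) arr.length (t + 1) := by
  unfold ngVal
  rcases findNextB_spec arr (aV arr t) arr.length (t + 1)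
    with ⟨h1, _⟩ | ⟨w, h1, _, h3, _, _⟩
  · rw [h1]
    simp
  · rw [h1]
    have hc : (0:Int) ≤ (w:Int) ∧ (w:Int) < (arr.length : Int) :=
      ⟨Int.natCast_nonneg w, by exact_mod_cast h3⟩
    rw [if_pos ⟨ht, hc⟩]

-- ===== VERDICT (by name: the statement is the Claim_ definition above) =====
theorem find_next_and_previous_greater_indexes_spec : Claim_equal_find_next_and_previous_greater_indexes := by
  intro arr _
  unfold Spec_find_next_and_previous_greater_indexes
  unfold find_next_and_previous_greater_indexes find_next_and_previous_greater_indexes_alt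
  simp only []
  rw [loop_inv arr arr.length (le_refl _)]
  congr 1
  · apply List.map_congr_left
    intro t htmem
    have ht : t < arr.length := List.mem_range.1 htmem
    unfold pgVal
    rw [if_pos ht]
    rfl
  · congr 1
    apply List.map_congr_left
    intro t htmem
    exact ngVal_final arr t (List.mem_range.1 htmem)
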